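-- pv_equiv track=rewrite | github.com/tr00x/SOMA-Core | src/soma/models.py | get_context_window
-- ===== SOURCE A (Python) =====
-- MODEL_CONTEXT_WINDOWS: dict[str, int] = {
--     # Anthropic
--     "claude-3-opus-20240229": 200_000,
--     "claude-3-sonnet-20240229": 200_000,
--     "claude-3-haiku-20240307": 200_000,
--     "claude-3-5-sonnet-20241022": 200_000,
--     "claude-3-5-haiku-20241022": 200_000,
--     "claude-sonnet-4-20250514": 200_000,
--     "claude-opus-4-20250514": 200_000,
--     # OpenAI
--     "gpt-4": 8_192,
--     "gpt-4-turbo": 128_000,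
--     "gpt-4o": 128_000,
--     "gpt-4o-mini": 128_000,
--     "o1": 200_000,
--     "o1-mini": 128_000,
--     "o3": 200_000,
--     "o3-mini": 200_000,
--     # Default fallback
--     "default": 200_000,
-- }
--
-- def get_context_window(model_name: str) -> int:
--     """Look up context window size for a model.
--
--     Strategy: exact match first, then prefix match, then default.
--     """
--     # Exact match
--     if model_name in MODEL_CONTEXT_WINDOWS:
--         return MODEL_CONTEXT_WINDOWS[model_name]
--
--     # Prefix match: find the longest key that is a prefix of model_name
--     best_match: str | None = None
--     best_len = 0
--     for key in MODEL_CONTEXT_WINDOWS: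
--         if key == "default":
--             continue
--         if model_name.startswith(key) and len(key) > best_len:
--             best_match = key
--             best_len = len(key)
--
--     if best_match is not None:
--         return MODEL_CONTEXT_WINDOWS[best_match]
--
--     return MODEL_CONTEXT_WINDOWS["default"]
-- ===== SOURCE B (Python) =====
-- MODEL_CONTEXT_WINDOWS: dict[str, int] = {
--     "claude-3-opus-20240229": 200_000,
--     "claude-3-sonnet-20240229": 200_000,
--     "claude-3-haiku-20240307": 200_000,
--     "claude-3-5-sonnet-20241022": 200_000,
--     "claude-3-5-haiku-20241022": 200_000,
--     "claude-sonnet-4-20250514": 200_000,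
--     "claude-opus-4-20250514": 200_000,
--     "gpt-4": 8_192,
--     "gpt-4-turbo": 128_000,
--     "gpt-4o": 128_000,
--     "gpt-4o-mini": 128_000,
--     "o1": 200_000,
--     "o1-mini": 128_000,
--     "o3": 200_000,
--     "o3-mini": 200_000,
--     "default": 200_000,
-- }
--
--
-- def get_context_window(model_name: str) -> int:
--     """Longest-prefix lookup: try candidate keys longest first, fall back to default.
--
--     An exact key is its own longest prefix, so no separate exact-match pass is needed.
--     """
--     candidates = sorted((k for k in MODEL_CONTEXT_WINDOWS if k != "default"),
--                         key=len, reverse=True)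
--     for key in candidates:
--         if model_name.startswith(key):
--             return MODEL_CONTEXT_WINDOWS[key]
--     return MODEL_CONTEXT_WINDOWS["default"]
-- ===== Notes on version B (the rewrite author's own statement) =====
-- stated objective: simpler
-- what changed: Replaced A's exact-match branch plus scan-all-keys-tracking-max loop with a single sort-once (by key length, descending) then first-prefix-match early-exit pass; the exact-match case is subsumed by longest-prefix.
import Mathlib
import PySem

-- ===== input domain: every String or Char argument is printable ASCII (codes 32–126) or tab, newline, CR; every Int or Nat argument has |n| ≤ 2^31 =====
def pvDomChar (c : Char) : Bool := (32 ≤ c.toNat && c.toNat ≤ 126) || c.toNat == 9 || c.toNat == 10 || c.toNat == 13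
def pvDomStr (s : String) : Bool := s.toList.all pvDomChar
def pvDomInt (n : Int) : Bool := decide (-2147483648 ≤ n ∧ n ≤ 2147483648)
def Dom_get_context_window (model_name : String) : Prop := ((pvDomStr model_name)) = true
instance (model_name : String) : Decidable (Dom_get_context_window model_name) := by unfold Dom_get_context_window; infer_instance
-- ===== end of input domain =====

-- B replaces A's exact-match branch plus scan-all-keys max-tracking loop by one sort-once
-- (key length, descending) then first-prefix-match early-exit pass (objective: simpler).

-- ===== PORT A =====
-- MODEL_CONTEXT_WINDOWS (module constant, shared by both ports as data)
def pvMCW : PySem.Dict String Int := PySem.Dict.ofList [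
  ("claude-3-opus-20240229", 200000),
  ("claude-3-sonnet-20240229", 200000),
  ("claude-3-haiku-20240307", 200000),
  ("claude-3-5-sonnet-20241022", 200000),
  ("claude-3-5-haiku-20241022", 200000),
  ("claude-sonnet-4-20250514", 200000),
  ("claude-opus-4-20250514", 200000),
  ("gpt-4", 8192),
  ("gpt-4-turbo", 128000),
  ("gpt-4o", 128000),
  ("gpt-4o-mini", 128000),
  ("o1", 200000),
  ("o1-mini", 128000),
  ("o3", 200000),
  ("o3-mini", 200000),
  ("default", 200000)]

def get_context_window (model_name : String) : Int :=
  if pvMCW.contains model_name then pvMCW.getD model_name 0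
  else
    let st := pvMCW.keys.foldl
      (fun (st : Option String × Int) key =>
        if key == "default" then st
        else if PySem.Str.startswith model_name key = true ∧ st.2 < PySem.Str.len key
             then (some key, PySem.Str.len key) else st)
      (none, 0)
    match st.1 with
    | some k => pvMCW.getD k 0
    | none => pvMCW.getD "default" 0

-- ===== PORT B =====
-- the for-loop with early return: first candidate that is a prefix wins
def pvFirstMatch (model_name : String) : List String → Int
  | [] => pvMCW.getD "default" 0
  | k :: rest =>
      if PySem.Str.startswith model_name k = true then pvMCW.getD k 0
      else pvFirstMatch model_name rest

def get_context_window_alt (model_name : String) : Int :=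
  let candidates := PySem.List.sorted (pvMCW.keys.filter (fun k => k ≠ "default"))
      (fun k => PySem.Str.len k) true
  pvFirstMatch model_name candidates

-- ===== PRECONDITION & SPEC =====
def Spec_get_context_window (model_name : String) (out : Int) : Prop := out = get_context_window_alt model_name
instance (model_name : String) (out : Int) : Decidable (Spec_get_context_window model_name out) := by unfold Spec_get_context_window; infer_instance

-- ===== CLAIM (what is proved, stated in full; the proofs are below) =====
def Claim_equal_get_context_window : Prop := ∀ (model_name : String), Dom_get_context_window model_name → Spec_get_context_window model_name (get_context_window model_name)

-- ===== LEMMAS AND PROOFS =====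
lemma pvKeys_eq : pvMCW.keys = ["claude-3-opus-20240229", "claude-3-sonnet-20240229",
    "claude-3-haiku-20240307", "claude-3-5-sonnet-20241022", "claude-3-5-haiku-20241022",
    "claude-sonnet-4-20250514", "claude-opus-4-20250514", "gpt-4", "gpt-4-turbo", "gpt-4o",
    "gpt-4o-mini", "o1", "o1-mini", "o3", "o3-mini", "default"] := by decide

lemma pvCand_eq : PySem.List.sorted (pvMCW.keys.filter (fun k => k ≠ "default"))
    (fun k => PySem.Str.len k) true =
    ["claude-3-5-sonnet-20241022", "claude-3-5-haiku-20241022", "claude-3-sonnet-20240229",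
     "claude-sonnet-4-20250514", "claude-3-haiku-20240307", "claude-3-opus-20240229",
     "claude-opus-4-20250514", "gpt-4-turbo", "gpt-4o-mini", "o1-mini", "o3-mini",
     "gpt-4o", "gpt-4", "o1", "o3"] := by decide

-- two keys that both prefix model_name are comparable; incomparable keys cannot both match
lemma pv_sw_false {m p q : String} (h : PySem.Str.startswith m p = true)
    (hpq : ¬ p.toList <+: q.toList) (hqp : ¬ q.toList <+: p.toList) :
    PySem.Str.startswith m q = false := by
  cases hx : PySem.Str.startswith m q
  · rfl
  · exfalso
    rw [PySem.Str.startswith_eq, PySem.Chars.startswith_iff] at h hx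
    rcases List.prefix_or_prefix_of_prefix h hx with h' | h'
    exacts [hpq h', hqp h']

-- a prefix of a matching key matches too
lemma pv_sw_down {m p q : String} (hpq : p.toList <+: q.toList)
    (h : PySem.Str.startswith m q = true) : PySem.Str.startswith m p = true := by
  rw [PySem.Str.startswith_eq, PySem.Chars.startswith_iff] at h ⊢
  exact hpq.trans h

-- ===== VERDICT (by name: the statement is the Claim_ definition above) =====
set_option maxHeartbeats 2000000 in
theorem get_context_window_spec : Claim_equal_get_context_window := by
  intro m _
  unfold Spec_get_context_window
  by_cases hc : pvMCW.contains m = true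
  · have hm : m ∈ pvMCW.keys := by
      rw [PySem.Dict.contains_eq_decide_mem_keys] at hc
      exact of_decide_eq_true hc
    rw [pvKeys_eq] at hm
    fin_cases hm <;> decide

  · -- non-exact branch: case split on candidates, longest first
    by_cases a1 : PySem.Str.startswith m "claude-3-5-sonnet-20241022" = true
    · -- first match: claude-3-5-sonnet-20241022
      have d2 := pv_sw_false (q := "claude-3-5-haiku-20241022") a1 (by decide) (by decide)
      have d3 := pv_sw_false (q := "claude-3-sonnet-20240229") a1 (by decide) (by decide)
      have d4 := pv_sw_false (q := "claude-sonnet-4-20250514") a1 (by decide) (by decide)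
      have d5 := pv_sw_false (q := "claude-3-haiku-20240307") a1 (by decide) (by decide)
      have d6 := pv_sw_false (q := "claude-3-opus-20240229") a1 (by decide) (by decide)
      have d7 := pv_sw_false (q := "claude-opus-4-20250514") a1 (by decide) (by decide)
      have d8 := pv_sw_false (q := "gpt-4-turbo") a1 (by decide) (by decide)
      have d9 := pv_sw_false (q := "gpt-4o-mini") a1 (by decide) (by decide)
      have d10 := pv_sw_false (q := "o1-mini") a1 (by decide) (by decide)
      have d11 := pv_sw_false (q := "o3-mini") a1 (by decide) (by decide)
      have d12 := pv_sw_false (q := "gpt-4o") a1 (by decide) (by decide)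
      have d13 := pv_sw_false (q := "gpt-4") a1 (by decide) (by decide)
      have d14 := pv_sw_false (q := "o1") a1 (by decide) (by decide)
      have d15 := pv_sw_false (q := "o3") a1 (by decide) (by decide)
      simp only [get_context_window, get_context_window_alt, pvCand_eq, pvFirstMatch, hc]
      simp at a1 d2 d3 d4 d5 d6 d7 d8 d9 d10 d11 d12 d13 d14 d15
      rw [pvKeys_eq]
      simp [a1, d2, d3, d4, d5, d6, d7, d8, d9, d10, d11, d12, d13, d14, d15]
      try decide
    · -- no match yet
      by_cases a2 : PySem.Str.startswith m "claude-3-5-haiku-20241022" = true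
      · -- first match: claude-3-5-haiku-20241022
        have d3 := pv_sw_false (q := "claude-3-sonnet-20240229") a2 (by decide) (by decide)
        have d4 := pv_sw_false (q := "claude-sonnet-4-20250514") a2 (by decide) (by decide)
        have d5 := pv_sw_false (q := "claude-3-haiku-20240307") a2 (by decide) (by decide)
        have d6 := pv_sw_false (q := "claude-3-opus-20240229") a2 (by decide) (by decide)
        have d7 := pv_sw_false (q := "claude-opus-4-20250514") a2 (by decide) (by decide)
        have d8 := pv_sw_false (q := "gpt-4-turbo") a2 (by decide) (by decide)
        have d9 := pv_sw_false (q := "gpt-4o-mini") a2 (by decide) (by decide)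
        have d10 := pv_sw_false (q := "o1-mini") a2 (by decide) (by decide)
        have d11 := pv_sw_false (q := "o3-mini") a2 (by decide) (by decide)
        have d12 := pv_sw_false (q := "gpt-4o") a2 (by decide) (by decide)
        have d13 := pv_sw_false (q := "gpt-4") a2 (by decide) (by decide)
        have d14 := pv_sw_false (q := "o1") a2 (by decide) (by decide)
        have d15 := pv_sw_false (q := "o3") a2 (by decide) (by decide)
        simp only [get_context_window, get_context_window_alt, pvCand_eq, pvFirstMatch, hc]
        simp at a1 a2 d3 d4 d5 d6 d7 d8 d9 d10 d11 d12 d13 d14 d15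
        rw [pvKeys_eq]
        simp [a1, a2, d3, d4, d5, d6, d7, d8, d9, d10, d11, d12, d13, d14, d15]
        try decide
      · -- no match yet
        by_cases a3 : PySem.Str.startswith m "claude-3-sonnet-20240229" = true
        · -- first match: claude-3-sonnet-20240229
          have d4 := pv_sw_false (q := "claude-sonnet-4-20250514") a3 (by decide) (by decide)
          have d5 := pv_sw_false (q := "claude-3-haiku-20240307") a3 (by decide) (by decide)
          have d6 := pv_sw_false (q := "claude-3-opus-20240229") a3 (by decide) (by decide)
          have d7 := pv_sw_false (q := "claude-opus-4-20250514") a3 (by decide) (by decide)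
          have d8 := pv_sw_false (q := "gpt-4-turbo") a3 (by decide) (by decide)
          have d9 := pv_sw_false (q := "gpt-4o-mini") a3 (by decide) (by decide)
          have d10 := pv_sw_false (q := "o1-mini") a3 (by decide) (by decide)
          have d11 := pv_sw_false (q := "o3-mini") a3 (by decide) (by decide)
          have d12 := pv_sw_false (q := "gpt-4o") a3 (by decide) (by decide)
          have d13 := pv_sw_false (q := "gpt-4") a3 (by decide) (by decide)
          have d14 := pv_sw_false (q := "o1") a3 (by decide) (by decide)
          have d15 := pv_sw_false (q := "o3") a3 (by decide) (by decide)
          simp only [get_context_window, get_context_window_alt, pvCand_eq, pvFirstMatch, hc]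
          simp at a1 a2 a3 d4 d5 d6 d7 d8 d9 d10 d11 d12 d13 d14 d15
          rw [pvKeys_eq]
          simp [a1, a2, a3, d4, d5, d6, d7, d8, d9, d10, d11, d12, d13, d14, d15]
          try decide
        · -- no match yet
          by_cases a4 : PySem.Str.startswith m "claude-sonnet-4-20250514" = true
          · -- first match: claude-sonnet-4-20250514
            have d5 := pv_sw_false (q := "claude-3-haiku-20240307") a4 (by decide) (by decide)
            have d6 := pv_sw_false (q := "claude-3-opus-20240229") a4 (by decide) (by decide)
            have d7 := pv_sw_false (q := "claude-opus-4-20250514") a4 (by decide) (by decide)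
            have d8 := pv_sw_false (q := "gpt-4-turbo") a4 (by decide) (by decide)
            have d9 := pv_sw_false (q := "gpt-4o-mini") a4 (by decide) (by decide)
            have d10 := pv_sw_false (q := "o1-mini") a4 (by decide) (by decide)
            have d11 := pv_sw_false (q := "o3-mini") a4 (by decide) (by decide)
            have d12 := pv_sw_false (q := "gpt-4o") a4 (by decide) (by decide)
            have d13 := pv_sw_false (q := "gpt-4") a4 (by decide) (by decide)
            have d14 := pv_sw_false (q := "o1") a4 (by decide) (by decide)
            have d15 := pv_sw_false (q := "o3") a4 (by decide) (by decide)
            simp only [get_context_window, get_context_window_alt, pvCand_eq, pvFirstMatch, hc]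
            simp at a1 a2 a3 a4 d5 d6 d7 d8 d9 d10 d11 d12 d13 d14 d15
            rw [pvKeys_eq]
            simp [a1, a2, a3, a4, d5, d6, d7, d8, d9, d10, d11, d12, d13, d14, d15]
            try decide
          · -- no match yet
            by_cases a5 : PySem.Str.startswith m "claude-3-haiku-20240307" = true
            · -- first match: claude-3-haiku-20240307
              have d6 := pv_sw_false (q := "claude-3-opus-20240229") a5 (by decide) (by decide)
              have d7 := pv_sw_false (q := "claude-opus-4-20250514") a5 (by decide) (by decide)
              have d8 := pv_sw_false (q := "gpt-4-turbo") a5 (by decide) (by decide)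
              have d9 := pv_sw_false (q := "gpt-4o-mini") a5 (by decide) (by decide)
              have d10 := pv_sw_false (q := "o1-mini") a5 (by decide) (by decide)
              have d11 := pv_sw_false (q := "o3-mini") a5 (by decide) (by decide)
              have d12 := pv_sw_false (q := "gpt-4o") a5 (by decide) (by decide)
              have d13 := pv_sw_false (q := "gpt-4") a5 (by decide) (by decide)
              have d14 := pv_sw_false (q := "o1") a5 (by decide) (by decide)
              have d15 := pv_sw_false (q := "o3") a5 (by decide) (by decide)
              simp only [get_context_window, get_context_window_alt, pvCand_eq, pvFirstMatch, hc]
              simp at a1 a2 a3 a4 a5 d6 d7 d8 d9 d10 d11 d12 d13 d14 d15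
              rw [pvKeys_eq]
              simp [a1, a2, a3, a4, a5, d6, d7, d8, d9, d10, d11, d12, d13, d14, d15]
              try decide
            · -- no match yet
              by_cases a6 : PySem.Str.startswith m "claude-3-opus-20240229" = true
              · -- first match: claude-3-opus-20240229
                have d7 := pv_sw_false (q := "claude-opus-4-20250514") a6 (by decide) (by decide)
                have d8 := pv_sw_false (q := "gpt-4-turbo") a6 (by decide) (by decide)
                have d9 := pv_sw_false (q := "gpt-4o-mini") a6 (by decide) (by decide)
                have d10 := pv_sw_false (q := "o1-mini") a6 (by decide) (by decide)
                have d11 := pv_sw_false (q := "o3-mini") a6 (by decide) (by decide)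
                have d12 := pv_sw_false (q := "gpt-4o") a6 (by decide) (by decide)
                have d13 := pv_sw_false (q := "gpt-4") a6 (by decide) (by decide)
                have d14 := pv_sw_false (q := "o1") a6 (by decide) (by decide)
                have d15 := pv_sw_false (q := "o3") a6 (by decide) (by decide)
                simp only [get_context_window, get_context_window_alt, pvCand_eq, pvFirstMatch, hc]
                simp at a1 a2 a3 a4 a5 a6 d7 d8 d9 d10 d11 d12 d13 d14 d15
                rw [pvKeys_eq]
                simp [a1, a2, a3, a4, a5, a6, d7, d8, d9, d10, d11, d12, d13, d14, d15]
                try decide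
              · -- no match yet
                by_cases a7 : PySem.Str.startswith m "claude-opus-4-20250514" = true
                · -- first match: claude-opus-4-20250514
                  have d8 := pv_sw_false (q := "gpt-4-turbo") a7 (by decide) (by decide)
                  have d9 := pv_sw_false (q := "gpt-4o-mini") a7 (by decide) (by decide)
                  have d10 := pv_sw_false (q := "o1-mini") a7 (by decide) (by decide)
                  have d11 := pv_sw_false (q := "o3-mini") a7 (by decide) (by decide)
                  have d12 := pv_sw_false (q := "gpt-4o") a7 (by decide) (by decide)
                  have d13 := pv_sw_false (q := "gpt-4") a7 (by decide) (by decide)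
                  have d14 := pv_sw_false (q := "o1") a7 (by decide) (by decide)
                  have d15 := pv_sw_false (q := "o3") a7 (by decide) (by decide)
                  simp only [get_context_window, get_context_window_alt, pvCand_eq, pvFirstMatch, hc]
                  simp at a1 a2 a3 a4 a5 a6 a7 d8 d9 d10 d11 d12 d13 d14 d15
                  rw [pvKeys_eq]
                  simp [a1, a2, a3, a4, a5, a6, a7, d8, d9, d10, d11, d12, d13, d14, d15]
                  try decide
                · -- no match yet
                  by_cases a8 : PySem.Str.startswith m "gpt-4-turbo" = true
                  · -- first match: gpt-4-turbo
                    have d9 := pv_sw_false (q := "gpt-4o-mini") a8 (by decide) (by decide)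
                    have d10 := pv_sw_false (q := "o1-mini") a8 (by decide) (by decide)
                    have d11 := pv_sw_false (q := "o3-mini") a8 (by decide) (by decide)
                    have d12 := pv_sw_false (q := "gpt-4o") a8 (by decide) (by decide)
                    have d13 := pv_sw_down (p := "gpt-4") (by decide) a8
                    have d14 := pv_sw_false (q := "o1") a8 (by decide) (by decide)
                    have d15 := pv_sw_false (q := "o3") a8 (by decide) (by decide)
                    simp only [get_context_window, get_context_window_alt, pvCand_eq, pvFirstMatch, hc]
                    simp at a1 a2 a3 a4 a5 a6 a7 a8 d9 d10 d11 d12 d13 d14 d15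
                    rw [pvKeys_eq]
                    simp [a1, a2, a3, a4, a5, a6, a7, a8, d9, d10, d11, d12, d13, d14, d15]
                    try decide
                  · -- no match yet
                    by_cases a9 : PySem.Str.startswith m "gpt-4o-mini" = true
                    · -- first match: gpt-4o-mini
                      have d10 := pv_sw_false (q := "o1-mini") a9 (by decide) (by decide)
                      have d11 := pv_sw_false (q := "o3-mini") a9 (by decide) (by decide)
                      have d12 := pv_sw_down (p := "gpt-4o") (by decide) a9
                      have d13 := pv_sw_down (p := "gpt-4") (by decide) a9
                      have d14 := pv_sw_false (q := "o1") a9 (by decide) (by decide)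
                      have d15 := pv_sw_false (q := "o3") a9 (by decide) (by decide)
                      simp only [get_context_window, get_context_window_alt, pvCand_eq, pvFirstMatch, hc]
                      simp at a1 a2 a3 a4 a5 a6 a7 a8 a9 d10 d11 d12 d13 d14 d15
                      rw [pvKeys_eq]
                      simp [a1, a2, a3, a4, a5, a6, a7, a8, a9, d10, d11, d12, d13, d14, d15]
                      try decide
                    · -- no match yet
                      by_cases a10 : PySem.Str.startswith m "o1-mini" = true
                      · -- first match: o1-mini
                        have d11 := pv_sw_false (q := "o3-mini") a10 (by decide) (by decide)
                        have d12 := pv_sw_false (q := "gpt-4o") a10 (by decide) (by decide)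
                        have d13 := pv_sw_false (q := "gpt-4") a10 (by decide) (by decide)
                        have d14 := pv_sw_down (p := "o1") (by decide) a10
                        have d15 := pv_sw_false (q := "o3") a10 (by decide) (by decide)
                        simp only [get_context_window, get_context_window_alt, pvCand_eq, pvFirstMatch, hc]
                        simp at a1 a2 a3 a4 a5 a6 a7 a8 a9 a10 d11 d12 d13 d14 d15
                        rw [pvKeys_eq]
                        simp [a1, a2, a3, a4, a5, a6, a7, a8, a9, a10, d11, d12, d13, d14, d15]
                        try decide
                      · -- no match yet
                        by_cases a11 : PySem.Str.startswith m "o3-mini" = true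
                        · -- first match: o3-mini
                          have d12 := pv_sw_false (q := "gpt-4o") a11 (by decide) (by decide)
                          have d13 := pv_sw_false (q := "gpt-4") a11 (by decide) (by decide)
                          have d14 := pv_sw_false (q := "o1") a11 (by decide) (by decide)
                          have d15 := pv_sw_down (p := "o3") (by decide) a11
                          simp only [get_context_window, get_context_window_alt, pvCand_eq, pvFirstMatch, hc]
                          simp at a1 a2 a3 a4 a5 a6 a7 a8 a9 a10 a11 d12 d13 d14 d15
                          rw [pvKeys_eq]
                          simp [a1, a2, a3, a4, a5, a6, a7, a8, a9, a10, a11, d12, d13, d14, d15]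
                          try decide
                        · -- no match yet
                          by_cases a12 : PySem.Str.startswith m "gpt-4o" = true
                          · -- first match: gpt-4o
                            have d13 := pv_sw_down (p := "gpt-4") (by decide) a12
                            have d14 := pv_sw_false (q := "o1") a12 (by decide) (by decide)
                            have d15 := pv_sw_false (q := "o3") a12 (by decide) (by decide)
                            simp only [get_context_window, get_context_window_alt, pvCand_eq, pvFirstMatch, hc]
                            simp at a1 a2 a3 a4 a5 a6 a7 a8 a9 a10 a11 a12 d13 d14 d15
                            rw [pvKeys_eq]
                            simp [a1, a2, a3, a4, a5, a6, a7, a8, a9, a10, a11, a12, d13, d14, d15]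
                            try decide
                          · -- no match yet
                            by_cases a13 : PySem.Str.startswith m "gpt-4" = true
                            · -- first match: gpt-4
                              have d14 := pv_sw_false (q := "o1") a13 (by decide) (by decide)
                              have d15 := pv_sw_false (q := "o3") a13 (by decide) (by decide)
                              simp only [get_context_window, get_context_window_alt, pvCand_eq, pvFirstMatch, hc]
                              simp at a1 a2 a3 a4 a5 a6 a7 a8 a9 a10 a11 a12 a13 d14 d15
                              rw [pvKeys_eq]
                              simp [a1, a2, a3, a4, a5, a6, a7, a8, a9, a10, a11, a12, a13, d14, d15]
                              try decide
                            · -- no match yet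
                              by_cases a14 : PySem.Str.startswith m "o1" = true
                              · -- first match: o1
                                have d15 := pv_sw_false (q := "o3") a14 (by decide) (by decide)
                                simp only [get_context_window, get_context_window_alt, pvCand_eq, pvFirstMatch, hc]
                                simp at a1 a2 a3 a4 a5 a6 a7 a8 a9 a10 a11 a12 a13 a14 d15
                                rw [pvKeys_eq]
                                simp [a1, a2, a3, a4, a5, a6, a7, a8, a9, a10, a11, a12, a13, a14, d15]
                                try decide
                              · -- no match yet
                                by_cases a15 : PySem.Str.startswith m "o3" = true
                                · -- first match: o3
                                  simp only [get_context_window, get_context_window_alt, pvCand_eq, pvFirstMatch, hc]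
                                  simp at a1 a2 a3 a4 a5 a6 a7 a8 a9 a10 a11 a12 a13 a14 a15
                                  rw [pvKeys_eq]
                                  simp [a1, a2, a3, a4, a5, a6, a7, a8, a9, a10, a11, a12, a13, a14, a15]
                                  try decide
                                · -- no match yet
                                  simp only [get_context_window, get_context_window_alt, pvCand_eq, pvFirstMatch, hc]
                                  simp at a1 a2 a3 a4 a5 a6 a7 a8 a9 a10 a11 a12 a13 a14 a15
                                  rw [pvKeys_eq]
                                  simp [a1, a2, a3, a4, a5, a6, a7, a8, a9, a10, a11, a12, a13, a14, a15]
                                  try decide
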